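-- pv_equiv track=rewrite | github.com/utsav-2611/Tetris | LSPI/tetris.py | _holes_in_board
-- ===== SOURCE A (Python) =====
-- def _is_block(cell):
-- 	return cell != 0
--
-- def _is_empty(cell):
-- 	return cell == 0
--
-- def _holes_in_board(board):
-- 	"""A hole is defined as an empty space below a block.
-- 	The block doesn't have to be directly above the hole for it to count.
-- 	This function identifies any holes and returns them as a [(x,y)]
-- 	"""
-- 	holes = []
-- 	block_in_col = False
-- 	for x in range(len(board[0])):
-- 		for y in range(len(board)):
-- 			if block_in_col and _is_empty(board[y][x]):
-- 				holes.append((x,y))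
-- 			elif _is_block(board[y][x]):
-- 				block_in_col = True
-- 		block_in_col = False
-- 	return holes
-- ===== SOURCE B (Python) =====
-- def _holes_in_board(board):
--     holes = []
--     h = len(board)
--     for x in range(len(board[0])):
--         first = next((y for y in range(h) if board[y][x] != 0), None)
--         if first is not None:
--             holes.extend((x, y) for y in range(first + 1, h) if board[y][x] == 0)
--     return holes
-- ===== Notes on version B (the rewrite author's own statement) =====
-- stated objective: simpler
-- what changed: Replaces the flag-carrying single pass per column with two phases: find the first block from the top with next(), then collect empty cells strictly below it.
import Mathlib
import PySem

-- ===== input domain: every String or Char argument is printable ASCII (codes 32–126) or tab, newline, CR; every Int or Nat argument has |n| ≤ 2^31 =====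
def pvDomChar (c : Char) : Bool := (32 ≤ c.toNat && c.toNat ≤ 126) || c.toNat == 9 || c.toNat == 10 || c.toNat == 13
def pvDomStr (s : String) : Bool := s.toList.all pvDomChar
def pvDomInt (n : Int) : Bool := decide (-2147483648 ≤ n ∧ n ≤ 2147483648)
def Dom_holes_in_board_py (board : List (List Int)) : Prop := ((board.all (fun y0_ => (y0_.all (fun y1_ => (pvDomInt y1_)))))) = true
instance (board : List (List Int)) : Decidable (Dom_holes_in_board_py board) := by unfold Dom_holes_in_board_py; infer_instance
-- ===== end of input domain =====

-- B replaces A's flag-carrying single pass per column by find-first-block then collect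
-- empties below it (objective: simpler).

-- board[y][x]; exact under Pre_ (both indices are then in range and nonnegative)
def pvCell (board : List (List Int)) (x y : Nat) : Int := (board.getD y []).getD x 0

-- ===== PORT A =====
def holes_in_board_py (board : List (List Int)) : List (Int × Int) :=
  (List.range (board.headD []).length).foldl (fun holes x =>
    ((List.range board.length).foldl
      (fun (st : List (Int × Int) × Bool) y =>
        if st.2 && (pvCell board x y == 0) then (st.1 ++ [((x : Int), (y : Int))], st.2)
        else if pvCell board x y != 0 then (st.1, true)
        else st)
      (holes, false)).1)
    []

-- ===== PORT B =====
def pvColHoles (board : List (List Int)) (x : Nat) : List (Int × Int) :=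
  match (List.range board.length).find? (fun y => pvCell board x y != 0) with
  | none => []
  | some f =>
      ((List.range' (f + 1) (board.length - (f + 1))).filter
        (fun y => pvCell board x y == 0)).map (fun y => ((x : Int), (y : Int)))

def holes_in_board_py_alt (board : List (List Int)) : List (Int × Int) :=
  (List.range (board.headD []).length).foldl (fun holes x => holes ++ pvColHoles board x) []

-- ===== PRECONDITION & SPEC =====
-- Pre_ excludes exactly the inputs where the Python raises IndexError: the empty board
-- (board[0]) and ragged boards with some row shorter than row 0 (board[y][x]).
def Pre_holes_in_board_py (board : List (List Int)) : Prop :=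
  board ≠ [] ∧ ∀ row ∈ board, (board.headD []).length ≤ row.length
instance (board : List (List Int)) : Decidable (Pre_holes_in_board_py board) := by
  unfold Pre_holes_in_board_py; infer_instance
def pvWitness_holes_in_board_py : List (List Int) := [[1, 0], [0, 1]]
def Spec_holes_in_board_py (board : List (List Int)) (out : List (Int × Int)) : Prop :=
  out = holes_in_board_py_alt board
instance (board : List (List Int)) (out : List (Int × Int)) :
    Decidable (Spec_holes_in_board_py board out) := by unfold Spec_holes_in_board_py; infer_instance

-- ===== CLAIM (what is proved, stated in full; the proofs are below) =====
def Claim_equal_holes_in_board_py : Prop := ∀ (board : List (List Int)),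
  Dom_holes_in_board_py board → Pre_holes_in_board_py board →
  Spec_holes_in_board_py board (holes_in_board_py board)

-- ===== LEMMAS AND PROOFS =====

-- A's inner step for column x
def pvStep (board : List (List Int)) (x : Nat) (st : List (Int × Int) × Bool) (y : Nat) :
    List (Int × Int) × Bool :=
  if st.2 && (pvCell board x y == 0) then (st.1 ++ [((x : Int), (y : Int))], st.2)
  else if pvCell board x y != 0 then (st.1, true)
  else st

theorem pv_flag_true (board : List (List Int)) (x : Nat) :
    ∀ (k s : Nat) (acc : List (Int × Int)),
      (List.range' s k).foldl (pvStep board x) (acc, true)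
        = (acc ++ ((List.range' s k).filter (fun y => pvCell board x y == 0)).map
            (fun y => ((x : Int), (y : Int))), true) := by
  intro k
  induction k with
  | zero => intro s acc; simp
  | succ k ih =>
      intro s acc
      rw [List.range'_succ]
      by_cases h : pvCell board x s = 0
      · simp [List.foldl_cons, pvStep, h, ih]
      · simp [List.foldl_cons, pvStep, h, ih]

theorem pv_flag_false (board : List (List Int)) (x : Nat) :
    ∀ (k s : Nat) (acc : List (Int × Int)),
      ((List.range' s k).foldl (pvStep board x) (acc, false)).1
        = acc ++ (match (List.range' s k).find? (fun y => pvCell board x y != 0) with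
            | none => []
            | some f => ((List.range' (f + 1) (s + k - (f + 1))).filter
                (fun y => pvCell board x y == 0)).map (fun y => ((x : Int), (y : Int)))) := by
  intro k
  induction k with
  | zero => intro s acc; simp
  | succ k ih =>
      intro s acc
      rw [List.range'_succ]
      by_cases h : pvCell board x s = 0
      · have hfind : (List.range' (s + 1) k).find? (fun y => pvCell board x y != 0)
            = (s :: List.range' (s + 1) k).find? (fun y => pvCell board x y != 0) := by
          simp [h]
        simp only [List.foldl_cons]
        rw [show (pvStep board x (acc, false) s) = (acc, false) by simp [pvStep, h]]
        rw [ih (s + 1) acc, ← hfind]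
        have : s + 1 + k = s + (k + 1) := by omega
        rw [this]
      · simp only [List.foldl_cons]
        rw [show (pvStep board x (acc, false) s) = (acc, true) by simp [pvStep, h]]
        rw [pv_flag_true board x k (s + 1) acc]
        have hfind : (s :: List.range' (s + 1) k).find? (fun y => pvCell board x y != 0)
            = some s := by simp [h]
        rw [hfind]
        simp [show s + (k + 1) - (s + 1) = k by omega]

theorem pv_inner_eq (board : List (List Int)) (x : Nat) (acc : List (Int × Int)) :
    ((List.range board.length).foldl (pvStep board x) (acc, false)).1
      = acc ++ pvColHoles board x := by
  rw [List.range_eq_range', pv_flag_false board x board.length 0 acc]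
  simp [pvColHoles, List.range_eq_range']

theorem holes_in_board_py_spec : Claim_equal_holes_in_board_py := by
  intro board _ _
  unfold Spec_holes_in_board_py holes_in_board_py holes_in_board_py_alt
  have hfun : (fun (holes : List (Int × Int)) (x : Nat) =>
      ((List.range board.length).foldl (pvStep board x) (holes, false)).1)
      = fun holes x => holes ++ pvColHoles board x := by
    funext holes x
    exact pv_inner_eq board x holes
  calc (List.range (board.headD []).length).foldl (fun holes x =>
        ((List.range board.length).foldl
          (fun (st : List (Int × Int) × Bool) y =>
            if st.2 && (pvCell board x y == 0) then (st.1 ++ [((x : Int), (y : Int))], st.2)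
            else if pvCell board x y != 0 then (st.1, true)
            else st)
          (holes, false)).1) []
      = (List.range (board.headD []).length).foldl (fun holes x =>
          ((List.range board.length).foldl (pvStep board x) (holes, false)).1) [] := rfl
    _ = _ := by rw [hfun]
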